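-- pv_equiv track=rewrite | github.com/phaquinosilva/ufsc | INE5409/ch3_sistemas_lineares.py | diagonal_dominante
-- ===== SOURCE A (Python) =====
-- def diagonal_dominante(a):
--     # calcula vetor S
--     s = [0]*len(a)
--     for i in range(len(a)):
--         for j in range(len(a)):
--             s[i] += abs(a[i][j])
--         s[i] -= abs(a[i][i])  # retiro o elemento da diagonal principal
--     # testa diagonal dominante:
--     for i in range(len(a)):
--         if abs(a[i][i]) < s[i]:
--             return False
--     for i in range(len(a)):
--         if abs(a[i][i]) > s[i]:
--             return True
--     return False
-- ===== SOURCE B (Python) =====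
-- def diagonal_dominante(a):
--     n = len(a)
--     strict = False
--     for i in range(n):
--         d = abs(a[i][i])
--         s = sum(abs(a[i][j]) for j in range(n)) - d
--         if d < s:
--             return False
--         if d > s:
--             strict = True
--     return strict
-- ===== Notes on version B (the rewrite author's own statement) =====
-- stated objective: simpler
-- what changed: B replaces A's three passes (build the S vector with nested loops, then two separate scans over it) by one fused pass per row that computes the row sum, fails fast on a non-dominant row and carries a strictness flag.
import Mathlib
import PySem

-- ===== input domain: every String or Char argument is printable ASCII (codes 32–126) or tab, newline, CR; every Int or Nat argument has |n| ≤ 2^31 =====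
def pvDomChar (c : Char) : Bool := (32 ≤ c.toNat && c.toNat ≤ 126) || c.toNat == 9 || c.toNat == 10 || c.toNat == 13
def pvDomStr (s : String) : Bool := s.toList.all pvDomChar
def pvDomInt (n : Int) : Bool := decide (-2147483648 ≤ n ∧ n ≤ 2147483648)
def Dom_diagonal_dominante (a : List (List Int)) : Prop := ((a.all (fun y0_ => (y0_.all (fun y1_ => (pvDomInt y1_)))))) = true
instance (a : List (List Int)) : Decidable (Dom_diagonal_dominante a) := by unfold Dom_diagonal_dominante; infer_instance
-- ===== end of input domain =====

-- B replaces A's three passes (build the S vector, then two scans) by one fused pass per row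
-- with an early exit and a strictness flag; same values, simpler structure.

-- ===== PORT A =====
def diagonal_dominante (a : List (List Int)) : Bool :=
  let n : Int := a.length
  -- s[i] = sum_j |a[i][j]|  then minus |a[i][i]|
  let s : List Int := (PySem.List.pyRange 0 n 1).map (fun i =>
    (PySem.List.pyRange 0 n 1).foldl
      (fun acc j => acc + |PySem.List.pyGetD (PySem.List.pyGetD a i []) j 0|) 0
    - |PySem.List.pyGetD (PySem.List.pyGetD a i []) i 0|)
  -- first scan: any row with abs(diag) < s[i] → False
  if (PySem.List.pyRange 0 n 1).any (fun i =>
      decide (|PySem.List.pyGetD (PySem.List.pyGetD a i []) i 0| < PySem.List.pyGetD s i 0)) then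
    false
  -- second scan: any row with abs(diag) > s[i] → True
  else if (PySem.List.pyRange 0 n 1).any (fun i =>
      decide (PySem.List.pyGetD s i 0 < |PySem.List.pyGetD (PySem.List.pyGetD a i []) i 0|)) then
    true
  else
    false

-- ===== PORT B =====
-- single pass over the row indices, carrying the 'strict' flag; early return on d < s
def diagonal_dominante_altGo (a : List (List Int)) (n : Int) (strict : Bool) : List Int → Bool
  | [] => strict
  | i :: rest =>
    let d := |PySem.List.pyGetD (PySem.List.pyGetD a i []) i 0|
    let s := (PySem.List.pyRange 0 n 1).foldl
      (fun acc j => acc + |PySem.List.pyGetD (PySem.List.pyGetD a i []) j 0|) 0 - d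
    if d < s then false
    else diagonal_dominante_altGo a n (if s < d then true else strict) rest

def diagonal_dominante_alt (a : List (List Int)) : Bool :=
  diagonal_dominante_altGo a a.length false (PySem.List.pyRange 0 (a.length : Int) 1)

-- ===== PRECONDITION & SPEC =====
-- A reads a[i][j] for all i, j < len(a): it raises IndexError when some row is shorter than the
-- number of rows; exactly those inputs are excluded.
def Pre_diagonal_dominante (a : List (List Int)) : Prop := ∀ r ∈ a, a.length ≤ r.length
instance (a : List (List Int)) : Decidable (Pre_diagonal_dominante a) := by
  unfold Pre_diagonal_dominante; infer_instance
def pvWitness_diagonal_dominante : List (List Int) := [[2, 1], [0, 3]]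

def Spec_diagonal_dominante (a : List (List Int)) (out : Bool) : Prop := out = diagonal_dominante_alt a
instance (a : List (List Int)) (out : Bool) : Decidable (Spec_diagonal_dominante a out) := by
  unfold Spec_diagonal_dominante; infer_instance

-- ===== CLAIM (what is proved, stated in full; the proofs are below) =====
def Claim_equal_diagonal_dominante : Prop :=
  ∀ (a : List (List Int)), Dom_diagonal_dominante a → Pre_diagonal_dominante a →
    Spec_diagonal_dominante a (diagonal_dominante a)

-- ===== LEMMAS AND PROOFS =====

-- |a[i][i]| for row index i
def pvDiag (a : List (List Int)) (i : Int) : Int :=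
  |PySem.List.pyGetD (PySem.List.pyGetD a i []) i 0|

-- the off-diagonal sum s[i] (row sum over j < n minus the diagonal entry)
def pvOff (a : List (List Int)) (n i : Int) : Int :=
  (PySem.List.pyRange 0 n 1).foldl
    (fun acc j => acc + |PySem.List.pyGetD (PySem.List.pyGetD a i []) j 0|) 0 - pvDiag a i

-- B's loop in closed form: early-exit on any d < s, otherwise OR of the strictness tests
lemma altGo_eq (a : List (List Int)) (n : Int) (strict : Bool) (L : List Int) :
    diagonal_dominante_altGo a n strict L =
      if L.any (fun i => decide (pvDiag a i < pvOff a n i)) then false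
      else (strict || L.any (fun i => decide (pvOff a n i < pvDiag a i))) := by
  induction L generalizing strict with
  | nil => simp [diagonal_dominante_altGo]
  | cons i rest ih =>
    simp only [diagonal_dominante_altGo, List.any_cons, pvDiag, pvOff]
    by_cases h1 : |PySem.List.pyGetD (PySem.List.pyGetD a i []) i 0| <
        (PySem.List.pyRange 0 n 1).foldl
          (fun acc j => acc + |PySem.List.pyGetD (PySem.List.pyGetD a i []) j 0|) 0
        - |PySem.List.pyGetD (PySem.List.pyGetD a i []) i 0|
    · simp [h1, pvDiag, pvOff]
    · rw [if_neg h1, ih]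
      by_cases h2 : (PySem.List.pyRange 0 n 1).foldl
          (fun acc j => acc + |PySem.List.pyGetD (PySem.List.pyGetD a i []) j 0|) 0
          - |PySem.List.pyGetD (PySem.List.pyGetD a i []) i 0| <
          |PySem.List.pyGetD (PySem.List.pyGetD a i []) i 0| <;>
        simp [h1, h2, pvDiag, pvOff, Bool.or_comm]

-- pointwise congruence for Bool.any (specific pairing of the two ports' predicates)
theorem pvAnyCongr {l : List Int} {p q : Int → Bool} (h : ∀ x ∈ l, p x = q x) :
    l.any p = l.any q := by
  induction l with
  | nil => rfl
  | cons a t ih =>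
    simp only [List.any_cons, h a (List.mem_cons_self),
      ih (fun x hx => h x (List.mem_cons_of_mem _ hx))]

-- A in closed form: the s-vector lookups collapse to the row values
lemma A_eq (a : List (List Int)) :
    diagonal_dominante a =
      if (PySem.List.pyRange 0 (a.length : Int) 1).any
          (fun i => decide (pvDiag a i < pvOff a (a.length : Int) i)) then false
      else (PySem.List.pyRange 0 (a.length : Int) 1).any
          (fun i => decide (pvOff a (a.length : Int) i < pvDiag a i)) := by
  unfold diagonal_dominante
  simp only []
  have h1 :
      ((PySem.List.pyRange 0 (a.length : Int) 1).any fun i =>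
        decide (|PySem.List.pyGetD (PySem.List.pyGetD a i []) i 0| <
          PySem.List.pyGetD ((PySem.List.pyRange 0 (a.length : Int) 1).map (fun i =>
            (PySem.List.pyRange 0 (a.length : Int) 1).foldl
              (fun acc j => acc + |PySem.List.pyGetD (PySem.List.pyGetD a i []) j 0|) 0
            - |PySem.List.pyGetD (PySem.List.pyGetD a i []) i 0|)) i 0)) =
      ((PySem.List.pyRange 0 (a.length : Int) 1).any fun i =>
        decide (pvDiag a i < pvOff a (a.length : Int) i)) := by
    apply pvAnyCongr
    intro i hi
    rw [PySem.List.mem_pyRange_one] at hi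
    rw [PySem.List.pyGetD_map_pyRange_of_nonneg _ _ _ _ hi.1 hi.2]
    simp only [pvDiag, pvOff]
    rfl
  have h2 :
      ((PySem.List.pyRange 0 (a.length : Int) 1).any fun i =>
        decide (PySem.List.pyGetD ((PySem.List.pyRange 0 (a.length : Int) 1).map (fun i =>
            (PySem.List.pyRange 0 (a.length : Int) 1).foldl
              (fun acc j => acc + |PySem.List.pyGetD (PySem.List.pyGetD a i []) j 0|) 0
            - |PySem.List.pyGetD (PySem.List.pyGetD a i []) i 0|)) i 0 <
          |PySem.List.pyGetD (PySem.List.pyGetD a i []) i 0|)) =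
      ((PySem.List.pyRange 0 (a.length : Int) 1).any fun i =>
        decide (pvOff a (a.length : Int) i < pvDiag a i)) := by
    apply pvAnyCongr
    intro i hi
    rw [PySem.List.mem_pyRange_one] at hi
    rw [PySem.List.pyGetD_map_pyRange_of_nonneg _ _ _ _ hi.1 hi.2]
    simp only [pvDiag, pvOff]
    rfl
  rw [h1, h2]
  by_cases hgt : ((PySem.List.pyRange 0 (a.length : Int) 1).any fun i =>
      decide (pvOff a (a.length : Int) i < pvDiag a i)) <;> simp [hgt]

-- ===== VERDICT (by name: the statement is the Claim_ definition above) =====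
theorem diagonal_dominante_spec : Claim_equal_diagonal_dominante := by
  intro a _ _
  unfold Spec_diagonal_dominante diagonal_dominante_alt
  rw [A_eq, altGo_eq, Bool.false_or]
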